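-- pv_equiv track=rewrite | github.com/lx-0/pixel-realm | scripts/gen_audio_assets.py | make_eq_frame
-- ===== SOURCE A (Python) =====
-- _ = (0, 0, 0, 0)          # transparent
--
-- K   = (13,  13,  13,  255)  # shadow black / outline
--
-- SB  = (42,  122, 192, 255)  # sky blue
--
-- PB  = (80,  168, 232, 255)  # player blue
--
-- HB  = (144, 208, 248, 255)  # ice / pale water
--
-- IW  = (200, 240, 255, 255)  # ice white / shimmer
--
-- def blank(w, h, fill=None):
--     fill = fill or _
--     return [[fill]*w for __ in range(h)]
--
-- def set_px(grid, x, y, color):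
--     if 0 <= y < len(grid) and 0 <= x < len(grid[0]):
--         grid[y][x] = color
--
-- def make_eq_frame(bar_heights):
--     """Create a 16×16 equalizer frame with 5 bars at given heights (0-10)."""
--     frame = blank(16, 16, _)
--     bar_colors = [SB, PB, HB, PB, SB]
--     bar_x_positions = [2, 5, 8, 11, 14]
--     for i, (bx, bh) in enumerate(zip(bar_x_positions, bar_heights)):
--         if bh <= 0:
--             continue
--         top = 14 - bh
--         for y in range(top, 15):
--             set_px(frame, bx, y, bar_colors[i])
--         # Cap highlight
--         set_px(frame, bx, top, IW)
--         # Base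
--         set_px(frame, bx, 15, K)
--     # Bottom baseline
--     for x in range(1, 16):
--         set_px(frame, x, 15, K)
--     return frame
-- ===== SOURCE B (Python) =====
-- _ = (0, 0, 0, 0)
-- K   = (13,  13,  13,  255)
-- SB  = (42,  122, 192, 255)
-- PB  = (80,  168, 232, 255)
-- HB  = (144, 208, 248, 255)
-- IW  = (200, 240, 255, 255)
--
-- def make_eq_frame(bar_heights):
--     """Create a 16x16 equalizer frame row-major, deciding each cell directly."""
--     bars = dict(zip([2, 5, 8, 11, 14], zip([SB, PB, HB, PB, SB], bar_heights)))
--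
--     def cell(x, y):
--         if y == 15:
--             return K if x >= 1 else _
--         if x in bars:
--             color, bh = bars[x]
--             if bh > 0:
--                 top = 14 - bh
--                 if y == top:
--                     return IW
--                 if y > top:
--                     return color
--         return _
--     return [[cell(x, y) for x in range(16)] for y in range(16)]
-- ===== Notes on version B (the rewrite author's own statement) =====
-- stated objective: simpler
-- what changed: B assembles the 16x16 frame row-major, computing each cell's final color directly from a position->(color,height) dict, instead of painting per-bar columns with repeated in-place pixel overwrites followed by a baseline pass.
import Mathlib
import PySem

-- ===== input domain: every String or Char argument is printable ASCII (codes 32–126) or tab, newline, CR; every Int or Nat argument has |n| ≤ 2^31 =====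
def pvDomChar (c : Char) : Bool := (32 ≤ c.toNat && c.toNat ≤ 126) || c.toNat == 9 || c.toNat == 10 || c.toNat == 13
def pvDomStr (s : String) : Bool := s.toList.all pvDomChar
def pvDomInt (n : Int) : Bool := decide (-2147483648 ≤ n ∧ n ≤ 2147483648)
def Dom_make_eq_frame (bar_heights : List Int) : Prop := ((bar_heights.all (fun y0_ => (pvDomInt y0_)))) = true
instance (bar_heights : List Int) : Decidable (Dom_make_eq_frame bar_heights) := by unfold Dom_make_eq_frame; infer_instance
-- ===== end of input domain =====

-- B builds the frame row-major, deciding each cell's final color directly, instead of A's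
-- in-place per-bar column painting followed by a baseline overwrite pass (objective: simpler).

-- ===== PORT A =====
abbrev pvColor := Int × Int × Int × Int
def pv_  : pvColor := (0, 0, 0, 0)
def pvK  : pvColor := (13, 13, 13, 255)
def pvSB : pvColor := (42, 122, 192, 255)
def pvPB : pvColor := (80, 168, 232, 255)
def pvHB : pvColor := (144, 208, 248, 255)
def pvIW : pvColor := (200, 240, 255, 255)

-- blank(w, h, fill): [[fill]*w for __ in range(h)]
def pvBlank (w h : Nat) (fill : pvColor) : List (List pvColor) :=
  (List.range h).map (fun _ => List.replicate w fill)

-- set_px: in-bounds check then grid[y][x] = color (grid[0] is never taken on an empty grid here)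
def set_px (g : List (List pvColor)) (x y : Int) (c : pvColor) : List (List pvColor) :=
  if 0 ≤ y ∧ y < (g.length : Int) ∧ 0 ≤ x ∧ x < ((g.headD []).length : Int) then
    g.set y.toNat ((g.getD y.toNat []).set x.toNat c)
  else g

-- body of A's `for i, (bx, bh) in enumerate(zip(...))` loop
def pvBarStep (bar_colors : List pvColor) (g : List (List pvColor)) (p : Int × Int × Int) :
    List (List pvColor) :=
  let i := p.1; let bx := p.2.1; let bh := p.2.2
  if bh ≤ 0 then g
  else
    let top := 14 - bh
    let g1 := (PySem.List.pyRange top 15 1).foldl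
      (fun g y => set_px g bx y (PySem.List.pyGetD bar_colors i pv_)) g
    let g2 := set_px g1 bx top pvIW
    set_px g2 bx 15 pvK

def make_eq_frame (bar_heights : List Int) : List (List (Int × Int × Int × Int)) :=
  let frame := pvBlank 16 16 pv_
  let bar_colors : List pvColor := [pvSB, pvPB, pvHB, pvPB, pvSB]
  let bar_x_positions : List Int := [2, 5, 8, 11, 14]
  let frame := (PySem.List.enumerate (List.zip bar_x_positions bar_heights) 0).foldl
    (pvBarStep bar_colors) frame
  (PySem.List.pyRange 1 16 1).foldl (fun g x => set_px g x 15 pvK) frame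

-- ===== PORT B =====
def pvCell (bars : PySem.Dict Int (pvColor × Int)) (x y : Int) : pvColor :=
  if y = 15 then (if 1 ≤ x then pvK else pv_)
  else
    match bars.get? x with
    | some (color, bh) =>
      if 0 < bh then
        let top := 14 - bh
        if y = top then pvIW
        else if top < y then color
        else pv_
      else pv_
    | none => pv_

def make_eq_frame_alt (bar_heights : List Int) : List (List (Int × Int × Int × Int)) :=
  let bars := PySem.Dict.ofList
    (List.zip [2, 5, 8, 11, 14] (List.zip [pvSB, pvPB, pvHB, pvPB, pvSB] bar_heights))
  (List.range 16).map (fun (y : Nat) => (List.range 16).map (fun (x : Nat) => pvCell bars (x : Int) (y : Int)))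

-- ===== PRECONDITION & SPEC =====
def Spec_make_eq_frame (bar_heights : List Int) (out : List (List (Int × Int × Int × Int))) : Prop := out = make_eq_frame_alt bar_heights
instance (bar_heights : List Int) (out : List (List (Int × Int × Int × Int))) : Decidable (Spec_make_eq_frame bar_heights out) := by unfold Spec_make_eq_frame; infer_instance

-- ===== CLAIM (what is proved, stated in full; the proofs are below) =====
def Claim_equal_make_eq_frame : Prop := ∀ (bar_heights : List Int), Dom_make_eq_frame bar_heights → Spec_make_eq_frame bar_heights (make_eq_frame bar_heights)

-- ===== LEMMAS AND PROOFS =====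

def pvWf (g : List (List pvColor)) : Prop := g.length = 16 ∧ ∀ r ∈ g, r.length = 16

def pvGetc (g : List (List pvColor)) (y x : Nat) : pvColor := (g.getD y []).getD x pv_

theorem pvWf_blank : pvWf (pvBlank 16 16 pv_) := by
  constructor
  · simp [pvBlank]
  · intro r hr
    simp [pvBlank] at hr
    simp [hr]

theorem pvGetc_blank (y x : Nat) : pvGetc (pvBlank 16 16 pv_) y x = pv_ := by
  have hrow : (pvBlank 16 16 pv_).getD y [] = List.replicate 16 pv_ ∨
      (pvBlank 16 16 pv_).getD y [] = ([] : List pvColor) := by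
    rcases Nat.lt_or_ge y 16 with hy | hy
    · left
      rw [List.getD_eq_getElem _ _ (by simp [pvBlank]; omega)]
      simp only [pvBlank, List.getElem_map]
    · right
      rw [List.getD_eq_default _ _ (by simp [pvBlank]; omega)]
  unfold pvGetc
  rcases hrow with h | h <;> rw [h]
  · simp only [List.getD, List.getElem?_replicate]
    split <;> rfl
  · simp [List.getD]

theorem pvWf_set_px (g : List (List pvColor)) (xi yi : Int) (c : pvColor) (h : pvWf g) :
    pvWf (set_px g xi yi c) := by
  obtain ⟨hl, hrows⟩ := h
  unfold set_px
  split
  · next hcond =>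
    refine ⟨by simpa using hl, ?_⟩
    intro r hrr
    rcases List.mem_or_eq_of_mem_set hrr with hm | he
    · exact hrows r hm
    · subst he
      rw [List.length_set, List.getD_eq_getElem _ _ (by omega)]
      exact hrows _ (List.getElem_mem (by omega))
  · exact ⟨hl, hrows⟩

theorem pvGetc_set_px (g : List (List pvColor)) (xi yi : Int) (c : pvColor) (h : pvWf g)
    (y x : Nat) (hy : y < 16) (hx : x < 16) :
    pvGetc (set_px g xi yi c) y x =
      if xi = (x : Int) ∧ yi = (y : Int) then c else pvGetc g y x := by
  obtain ⟨hl, hrows⟩ := h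
  have hg : g ≠ [] := by intro e; rw [e] at hl; simp at hl
  have hhead : (g.headD []).length = 16 := by
    cases g with
    | nil => exact absurd rfl hg
    | cons a t => exact hrows a (List.mem_cons_self ..)
  unfold set_px
  split
  · next hc =>
    obtain ⟨hy0, hylt, hx0, hxlt⟩ := hc
    rw [hl] at hylt
    rw [hhead] at hxlt
    have hyn : yi.toNat < g.length := by omega
    have hgetD : g.getD yi.toNat [] = g[yi.toNat] := List.getD_eq_getElem _ _ hyn
    unfold pvGetc
    rw [hgetD]
    rw [List.getD_eq_getElem (g.set yi.toNat (g[yi.toNat].set xi.toNat c)) []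
      (by rw [List.length_set]; omega)]
    rw [List.getElem_set]
    by_cases hyy : yi.toNat = y
    · rw [if_pos hyy]
      have hlenrow : (g[yi.toNat].set xi.toNat c).length = 16 := by
        rw [List.length_set]; exact hrows _ (List.getElem_mem hyn)
      rw [List.getD_eq_getElem _ _ (by omega)]
      rw [List.getElem_set]
      by_cases hxx : xi.toNat = x
      · rw [if_pos hxx, if_pos ⟨by omega, by omega⟩]
      · rw [if_neg hxx, if_neg (by rintro ⟨h1, h2⟩; omega)]
        subst hyy
        rw [List.getD_eq_getElem g [] (by omega), List.getD_eq_getElem _ _ (by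
          have := hrows _ (List.getElem_mem hyn); omega)]
    · rw [if_neg hyy, if_neg (by rintro ⟨h1, h2⟩; omega)]
      rw [List.getD_eq_getElem g [] (by omega)]
  · next hc =>
    rw [if_neg]
    rintro ⟨hxx, hyy⟩
    exact hc ⟨by omega, by omega, by omega, by omega⟩

theorem pvWf_foldl {α : Type} (f : List (List pvColor) → α → List (List pvColor))
    (hf : ∀ g a, pvWf g → pvWf (f g a)) :
    ∀ (l : List α) (g : List (List pvColor)), pvWf g → pvWf (l.foldl f g) := by
  intro l
  induction l with
  | nil => intro g hg; exact hg
  | cons a t ih => intro g hg; exact ih _ (hf g a hg)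

theorem pvGetc_paint (bx : Int) (c : pvColor) :
    ∀ (ys : List Int) (g : List (List pvColor)), pvWf g → ∀ (y x : Nat), y < 16 → x < 16 →
      pvGetc (ys.foldl (fun g yy => set_px g bx yy c) g) y x =
        if bx = (x : Int) ∧ (y : Int) ∈ ys then c else pvGetc g y x := by
  intro ys
  induction ys with
  | nil => intro g hg y x hy hx; simp
  | cons a t ih =>
    intro g hg y x hy hx
    rw [List.foldl_cons, ih _ (pvWf_set_px _ _ _ _ hg) y x hy hx,
        pvGetc_set_px _ _ _ _ hg y x hy hx]
    by_cases h1 : bx = (x : Int) <;> by_cases h2 : (y : Int) = a <;>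
      by_cases h3 : (y : Int) ∈ t <;>
      (simp [List.mem_cons, h1, h2, h3, eq_comm]; try (intro h; exact absurd h (by omega)))

theorem pvGetc_base :
    ∀ (xs : List Int) (g : List (List pvColor)), pvWf g → ∀ (y x : Nat), y < 16 → x < 16 →
      pvGetc (xs.foldl (fun g xx => set_px g xx 15 pvK) g) y x =
        if (x : Int) ∈ xs ∧ (y : Int) = 15 then pvK else pvGetc g y x := by
  intro xs
  induction xs with
  | nil => intro g hg y x hy hx; simp
  | cons a t ih =>
    intro g hg y x hy hx
    rw [List.foldl_cons, ih _ (pvWf_set_px _ _ _ _ hg) y x hy hx,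
        pvGetc_set_px _ _ _ _ hg y x hy hx]
    by_cases h1 : (x : Int) = a <;> by_cases h2 : (y : Int) = 15 <;>
      by_cases h3 : (x : Int) ∈ t <;>
      (simp [List.mem_cons, h1, h2, h3, eq_comm]; try (intro h; exact absurd h (by omega)))

theorem pvWf_bar (cols : List pvColor) (g : List (List pvColor)) (p : Int × Int × Int)
    (hg : pvWf g) : pvWf (pvBarStep cols g p) := by
  obtain ⟨i, bx, bh⟩ := p
  unfold pvBarStep
  by_cases hbh : bh ≤ 0
  · simp only [hbh, if_true]
    exact hg
  · simp only [hbh, if_false]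
    exact pvWf_set_px _ _ _ _ (pvWf_set_px _ _ _ _
      (pvWf_foldl _ (fun g a hg => pvWf_set_px _ _ _ _ hg) _ _ hg))

-- final color contributed by one bar at cell (x, y), overriding `old`
def pvBarCell (cols : List pvColor) (p : Int × Int × Int) (y x : Int) (old : pvColor) : pvColor :=
  if p.2.1 = x ∧ 0 < p.2.2 ∧ (y = 15 ∨ y = 14 - p.2.2 ∨ (14 - p.2.2 ≤ y ∧ y < 15))
  then (if y = 15 then pvK else if y = 14 - p.2.2 then pvIW
        else PySem.List.pyGetD cols p.1 pv_)
  else old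

theorem pvGetc_bar (cols : List pvColor) (g : List (List pvColor)) (hg : pvWf g)
    (p : Int × Int × Int) (y x : Nat) (hy : y < 16) (hx : x < 16) :
    pvGetc (pvBarStep cols g p) y x = pvBarCell cols p (y : Int) (x : Int) (pvGetc g y x) := by
  obtain ⟨i, bx, bh⟩ := p
  unfold pvBarStep pvBarCell
  by_cases hbh : bh ≤ 0
  · simp only [hbh, if_true]
    rw [if_neg (by rintro ⟨_, h, _⟩; omega)]
  · simp only [hbh, if_false]
    rw [pvGetc_set_px _ _ _ _ (pvWf_set_px _ _ _ _
          (pvWf_foldl _ (fun g a hg => pvWf_set_px _ _ _ _ hg) _ _ hg)) y x hy hx,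
        pvGetc_set_px _ _ _ _ (pvWf_foldl _ (fun g a hg => pvWf_set_px _ _ _ _ hg) _ _ hg) y x hy hx,
        pvGetc_paint _ _ _ _ hg y x hy hx]
    simp only [PySem.List.mem_pyRange_one]
    split_ifs <;> first | rfl | omega

theorem pvGetc_bars (cols : List pvColor) :
    ∀ (L : List (Int × Int × Int)) (g : List (List pvColor)), pvWf g →
      ∀ (y x : Nat), y < 16 → x < 16 →
      pvGetc (L.foldl (pvBarStep cols) g) y x =
        L.foldl (fun o p => pvBarCell cols p (y : Int) (x : Int) o) (pvGetc g y x) := by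
  intro L
  induction L with
  | nil => intro g hg y x hy hx; rfl
  | cons p t ih =>
    intro g hg y x hy hx
    rw [List.foldl_cons, List.foldl_cons, ih _ (pvWf_bar cols g p hg) y x hy hx,
        pvGetc_bar cols g hg p y x hy hx]

theorem pvWf_result (hs : List Int) : pvWf (make_eq_frame hs) := by
  unfold make_eq_frame
  exact pvWf_foldl _ (fun g a hg => pvWf_set_px _ _ _ _ hg) _ _
    (pvWf_foldl _ (pvWf_bar _) _ _ pvWf_blank)

theorem pvGetc_eq_getElem (g : List (List pvColor)) (y x : Nat)
    (h1 : y < g.length) (h2 : x < g[y].length) : g[y][x] = pvGetc g y x := by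
  unfold pvGetc
  rw [List.getD_eq_getElem _ [] h1, List.getD_eq_getElem _ pv_ h2]

theorem pvGetc_result (hs : List Int) (y x : Nat) (hy : y < 16) (hx : x < 16) :
    pvGetc (make_eq_frame hs) y x =
      if (x : Int) ∈ PySem.List.pyRange 1 16 1 ∧ (y : Int) = 15 then pvK
      else ((PySem.List.enumerate (List.zip [2, 5, 8, 11, 14] hs) 0).foldl
        (fun o p => pvBarCell [pvSB, pvPB, pvHB, pvPB, pvSB] p (y : Int) (x : Int) o) pv_) := by
  unfold make_eq_frame
  rw [pvGetc_base _ _ (pvWf_foldl _ (pvWf_bar _) _ _ pvWf_blank) y x hy hx,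
      pvGetc_bars _ _ _ pvWf_blank y x hy hx, pvGetc_blank]

set_option maxHeartbeats 2000000 in
theorem make_eq_frame_spec : Claim_equal_make_eq_frame := by
  unfold Claim_equal_make_eq_frame Spec_make_eq_frame
  intro hs hdom
  clear hdom
  have hwf := pvWf_result hs
  apply List.ext_getElem
  · rw [hwf.1]; simp [make_eq_frame_alt]
  intro y hy1 hy2
  have hy : y < 16 := by rw [hwf.1] at hy1; exact hy1
  apply List.ext_getElem
  · rw [hwf.2 _ (List.getElem_mem hy1)]
    simp [make_eq_frame_alt]
  intro x hx1 hx2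
  have hx : x < 16 := by rw [hwf.2 _ (List.getElem_mem hy1)] at hx1; exact hx1
  rw [pvGetc_eq_getElem _ _ _ hy1 hx1, pvGetc_result hs y x hy hx]
  simp only [make_eq_frame_alt, List.getElem_map, List.getElem_range]
  rcases hs with _ | ⟨a, _ | ⟨b, _ | ⟨c2, _ | ⟨d, _ | ⟨e, rest⟩⟩⟩⟩⟩ <;>
  · simp only [List.zip_cons_cons, List.zip_nil_left, List.zip_nil_right,
      PySem.List.enumerate, List.foldl_cons, List.foldl_nil, pvBarCell, pvCell,
      PySem.List.mem_pyRange_one]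
    clear hwf hy1 hy2 hx1 hx2
    simp [PySem.Dict.ofList, PySem.Dict.update, List.foldl_cons, List.foldl_nil,
      PySem.Dict.get?_insert, PySem.Dict.get?_empty, PySem.List.pyGetD]
    split_ifs <;>
      first
      | rfl
      | omega
      | ((try dsimp only); (try split_ifs) <;> first | rfl | omega)
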